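-- pv_equiv track=rewrite | github.com/mer1odas/homeWork1 | BLOCK 6/lvl55/55.6.py | dele
-- ===== SOURCE A (Python) =====
-- def dele(n):
--     a1 = 1
--     a2 = 1
--     sum1 = 0
--     for i in range(n):
--         a1 = a1 + a2
--         a2 = a1 + a2
--         sum1 += a1 + a2
--     return sum1
-- ===== SOURCE B (Python) =====
-- def _fib_pair(k):
--     # fast doubling: returns (F(k), F(k+1))
--     if k == 0:
--         return (0, 1)
--     a, b = _fib_pair(k >> 1)
--     c = a * (2 * b - a)
--     d = a * a + b * b
--     if k & 1:
--         return (d, c + d)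
--     return (c, d)
--
-- def dele(n):
--     if n <= 0:
--         return 0
--     # sum_{i=1}^{n} F(2i+3) = F(2n+4) - 3
--     return _fib_pair(2 * n + 4)[0] - 3
-- ===== Notes on version B (the rewrite author's own statement) =====
-- stated objective: alternative
-- what changed: Replaced the n-step big-integer loop by the closed-form identity sum = F(2n+4)-3 computed with fast-doubling Fibonacci.
import Mathlib
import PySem

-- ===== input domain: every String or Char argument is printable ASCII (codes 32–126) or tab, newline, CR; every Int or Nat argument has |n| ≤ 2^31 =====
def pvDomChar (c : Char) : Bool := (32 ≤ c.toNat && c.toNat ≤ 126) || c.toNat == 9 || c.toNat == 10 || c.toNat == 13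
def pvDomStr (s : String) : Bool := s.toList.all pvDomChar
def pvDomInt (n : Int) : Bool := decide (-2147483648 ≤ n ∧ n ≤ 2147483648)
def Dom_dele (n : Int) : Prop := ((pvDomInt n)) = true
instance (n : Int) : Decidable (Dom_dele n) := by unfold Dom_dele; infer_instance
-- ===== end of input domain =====

-- B replaces A's n-step loop by the closed form F(2n+4)-3 computed by fast-doubling Fibonacci (a different algorithm; return value proved equal).

-- ===== PORT A =====
def dele (n : Int) : Int :=
  ((PySem.List.pyRange 0 n 1).foldl
    (fun (s : Int × Int × Int) _ =>
      let a1 := s.1 + s.2.1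
      let a2 := a1 + s.2.1
      (a1, a2, s.2.2 + (a1 + a2)))
    (1, 1, 0)).2.2

-- ===== PORT B =====
-- fast doubling: returns (F(k), F(k+1))
def fibPair : Nat → Int × Int
  | 0 => (0, 1)
  | (k+1) =>
    let p := fibPair ((k+1) / 2)
    let a := p.1
    let b := p.2
    let c := a * (2 * b - a)
    let d := a * a + b * b
    if (k+1) % 2 = 1 then (d, c + d) else (c, d)
decreasing_by exact Nat.div_lt_self (Nat.succ_pos k) (by norm_num)

def dele_alt (n : Int) : Int :=
  if n ≤ 0 then 0
  else (fibPair (2 * n + 4).toNat).1 - 3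

-- ===== PRECONDITION & SPEC =====
def Spec_dele (n : Int) (out : Int) : Prop := out = dele_alt n
instance (n : Int) (out : Int) : Decidable (Spec_dele n out) := by unfold Spec_dele; infer_instance

-- ===== CLAIM (what is proved, stated in full; the proofs are below) =====
def Claim_equal_dele : Prop := ∀ (n : Int), Dom_dele n → Spec_dele n (dele n)

-- ===== LEMMAS AND PROOFS =====

theorem fib_add2 (a b c : Nat) (h1 : b = a+1) (h2 : c = a+2) :
    Nat.fib c = Nat.fib a + Nat.fib b := by
  subst h1; subst h2; exact Nat.fib_add_two

theorem fibPair_eq (k : Nat) : fibPair k = ((Nat.fib k : Int), (Nat.fib (k+1) : Int)) := by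
  induction k using Nat.strong_induction_on with
  | _ k ih =>
    match k with
    | 0 => simp [fibPair]
    | (m+1) =>
      rw [fibPair, ih ((m+1)/2) (Nat.div_lt_self (Nat.succ_pos m) (by norm_num))]
      set t := (m+1)/2 with ht
      have hle : Nat.fib t ≤ 2 * Nat.fib (t+1) :=
        le_trans (Nat.fib_le_fib_succ) (by omega)
      have h1 : (Nat.fib (2*t) : Int) = (Nat.fib t) * (2 * Nat.fib (t+1) - Nat.fib t) := by
        rw [Nat.fib_two_mul]; push_cast [hle]; ring
      have h2 : (Nat.fib (2*t+1) : Int) = (Nat.fib t) * (Nat.fib t) + (Nat.fib (t+1)) * (Nat.fib (t+1)) := by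
        rw [Nat.fib_two_mul_add_one]; push_cast; ring
      rcases Nat.even_or_odd (m+1) with he | ho
      · have hmod : (m+1) % 2 = 0 := Nat.even_iff.mp he
        have hm1 : m + 1 = 2 * t := by omega
        rw [if_neg (by omega), hm1, h1, h2]
      · have hmod : (m+1) % 2 = 1 := Nat.odd_iff.mp ho
        have hm1 : m + 1 = 2 * t + 1 := by omega
        have h3 : (Nat.fib (2*t+1+1) : Int) = (Nat.fib (2*t) : Int) + (Nat.fib (2*t+1) : Int) := by
          rw [show 2*t+1+1 = 2*t+2 by ring, Nat.fib_add_two]; push_cast; ring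
        rw [if_pos hmod, hm1, h3, h1, h2]

-- the loop body of A, named for the proofs
def step (s : Int × Int × Int) : Int × Int × Int :=
  let a1 := s.1 + s.2.1
  let a2 := a1 + s.2.1
  (a1, a2, s.2.2 + (a1 + a2))

theorem foldl_step_eq_iterate (l : List Int) (s : Int × Int × Int) :
    l.foldl
      (fun (s : Int × Int × Int) _ =>
        let a1 := s.1 + s.2.1
        let a2 := a1 + s.2.1
        (a1, a2, s.2.2 + (a1 + a2)))
      s = step^[l.length] s := by
  induction l generalizing s with
  | nil => simp
  | cons x xs ih =>
    rw [List.foldl_cons, ih, List.length_cons, Function.iterate_succ_apply]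
    rfl

theorem iterate_step (m : Nat) :
    step^[m] (1, 1, 0) =
      ((Nat.fib (2*m+1) : Int), (Nat.fib (2*m+2) : Int), (Nat.fib (2*m+4) : Int) - 3) := by
  induction m with
  | zero => simp [Nat.fib]
  | succ m ih =>
    rw [show 2*(m+1)+1 = 2*m+3 by ring, show 2*(m+1)+2 = 2*m+4 by ring,
        show 2*(m+1)+4 = 2*m+6 by ring,
        Function.iterate_succ_apply', ih]
    have f1 : Nat.fib (2*m+3) = Nat.fib (2*m+1) + Nat.fib (2*m+2) :=
      fib_add2 (2*m+1) (2*m+2) (2*m+3) (by ring) (by ring)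
    have f2 : Nat.fib (2*m+4) = Nat.fib (2*m+2) + Nat.fib (2*m+3) :=
      fib_add2 (2*m+2) (2*m+3) (2*m+4) (by ring) (by ring)
    have f3 : Nat.fib (2*m+5) = Nat.fib (2*m+3) + Nat.fib (2*m+4) :=
      fib_add2 (2*m+3) (2*m+4) (2*m+5) (by ring) (by ring)
    have f4 : Nat.fib (2*m+6) = Nat.fib (2*m+4) + Nat.fib (2*m+5) :=
      fib_add2 (2*m+4) (2*m+5) (2*m+6) (by ring) (by ring)
    refine Prod.ext ?_ (Prod.ext ?_ ?_) <;> simp [step] <;> omega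

-- ===== VERDICT (by name: the statement is the Claim_ definition above) =====
theorem dele_spec : Claim_equal_dele := by
  intro n _
  unfold Spec_dele dele dele_alt
  rw [foldl_step_eq_iterate, PySem.List.length_pyRange_one]
  by_cases hn : n ≤ 0
  · simp [show n.toNat = 0 by omega, hn]
  · rw [if_neg hn]
    rw [show (n - 0).toNat = n.toNat by omega, iterate_step, fibPair_eq]
    have h4 : (2 * n + 4).toNat = 2 * n.toNat + 4 := by omega
    simp [h4]
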